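-- pv_equiv track=rewrite | github.com/mnov88/eurlextract | streamlit_app.py | is_probably_jsonl
-- ===== SOURCE A (Python) =====
-- from typing import Any, Dict, Iterable, List, Optional, Tuple
--
-- def is_probably_jsonl(text: str, file_name: Optional[str]) -> bool:
--     """Heuristic to detect JSONL versus single JSON."""
--     if file_name and file_name.lower().endswith(".jsonl"):
--         return True
--     stripped = text.lstrip()
--     if stripped.startswith("[") or stripped.startswith("{"):
--         return False
--     lines = [ln.strip() for ln in text.splitlines() if ln.strip()]
--     if not lines:
--         return False
--     if all(ln.startswith("{") and ln.endswith("}") for ln in lines[: min(5, len(lines))]):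
--         return True
--     return False
-- ===== SOURCE B (Python) =====
-- from typing import Optional
--
--
-- def is_probably_jsonl(text: str, file_name: Optional[str]) -> bool:
--     """Heuristic to detect JSONL versus single JSON."""
--     # The text-scanning branch of the original is dead code: once the
--     # leading-'['/'{' case is excluded, the first non-empty stripped line
--     # cannot start with '{', so only the filename decides.
--     return bool(file_name and file_name.lower().endswith(".jsonl"))
-- ===== Notes on version B (the rewrite author's own statement) =====
-- stated objective: simpler
-- what changed: A's multi-line text-scanning branch is dead code (the first non-empty stripped line always starts with the first non-whitespace character of the text, which the leading-'['/'{' test has already excluded), so B drops all scanning and returns bool(file_name and file_name.lower().endswith('.jsonl')).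
import Mathlib
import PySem

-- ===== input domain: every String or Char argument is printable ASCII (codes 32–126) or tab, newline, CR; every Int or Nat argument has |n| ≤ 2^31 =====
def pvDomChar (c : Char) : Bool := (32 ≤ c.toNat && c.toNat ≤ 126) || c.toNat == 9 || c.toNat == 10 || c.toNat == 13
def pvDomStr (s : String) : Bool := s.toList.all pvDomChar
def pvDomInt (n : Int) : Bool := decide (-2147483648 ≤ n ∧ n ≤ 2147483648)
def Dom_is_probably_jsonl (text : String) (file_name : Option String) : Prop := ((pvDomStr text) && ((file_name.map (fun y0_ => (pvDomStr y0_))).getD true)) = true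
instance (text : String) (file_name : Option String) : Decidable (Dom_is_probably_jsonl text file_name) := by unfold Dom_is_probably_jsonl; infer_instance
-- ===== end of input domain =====

-- B drops A's text-scanning branch entirely (it is provably dead code: after the
-- leading-'['/'{' test, the first non-empty stripped line cannot start with '{'),
-- so only the filename decides; objective: simpler.

-- ===== PORT A =====
def is_probably_jsonl (text : String) (file_name : Option String) : Bool :=
  if (match file_name with
      | some f => !(f == "") && PySem.Str.endswith (PySem.Str.lower f) ".jsonl"
      | none => false) then
    true
  else
    let stripped := PySem.Str.lstrip text
    if PySem.Str.startswith stripped "[" || PySem.Str.startswith stripped "{" then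
      false
    else
      let lines := (PySem.Str.splitlines text).filterMap
        (fun ln => if PySem.Str.strip ln ≠ "" then some (PySem.Str.strip ln) else none)
      if lines.isEmpty then
        false
      else
        if (lines.take (min 5 lines.length)).all
            (fun ln => PySem.Str.startswith ln "{" && PySem.Str.endswith ln "}") then
          true
        else
          false

-- ===== PORT B =====
def is_probably_jsonl_alt (text : String) (file_name : Option String) : Bool :=
  match file_name with
  | some f => !(f == "") && PySem.Str.endswith (PySem.Str.lower f) ".jsonl"
  | none => false

-- ===== PRECONDITION & SPEC =====
def Spec_is_probably_jsonl (text : String) (file_name : Option String) (out : Bool) : Prop := out = is_probably_jsonl_alt text file_name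
instance (text : String) (file_name : Option String) (out : Bool) : Decidable (Spec_is_probably_jsonl text file_name out) := by unfold Spec_is_probably_jsonl; infer_instance

-- ===== CLAIM (what is proved, stated in full; the proofs are below) =====
def Claim_equal_is_probably_jsonl : Prop := ∀ (text : String) (file_name : Option String), Dom_is_probably_jsonl text file_name → Spec_is_probably_jsonl text file_name (is_probably_jsonl text file_name)

-- ===== LEMMAS AND PROOFS =====

-- the line-break predicate baked into PySem.Chars.splitlines
def pvIsB (c : Char) : Bool :=
  have n := c.toNat;
  decide (n = 10) || decide (n = 13) || decide (n = 11) || decide (n = 12) || decide (n = 28) || decide (n = 29) ||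
          decide (n = 30) || decide (n = 133) || decide (n = 8232) || decide (n = 8233)

theorem pv_splitlines_eq (s : List Char) :
    PySem.Chars.splitlines s = PySem.Chars.splitlines.go pvIsB s [] [] := rfl

-- the comprehension's per-line action, on the list-of-chars level
def pvG (l : List Char) : Option (List Char) :=
  if PySem.Chars.strip l ≠ [] then some (PySem.Chars.strip l) else none

theorem pv_isB_isspace (c : Char) (hb : pvIsB c = true) :
    PySem.Chars.isspace c = true := by
  simp [pvIsB, PySem.Chars.isspace] at *
  omega

theorem pv_strip_all_space (l : List Char) (h : l.all PySem.Chars.isspace = true) :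
    PySem.Chars.strip l = [] := by
  simp only [List.all_eq_true] at h
  have h1 : PySem.Chars.lstrip l = [] := by
    simp [PySem.Chars.lstrip, List.dropWhile_eq_nil_iff]
    exact h
  simp [PySem.Chars.strip, h1, PySem.Chars.rstrip]

theorem pv_rstrip_cons (c : Char) (l : List Char) (hc : ¬ PySem.Chars.isspace c = true) :
    ∃ ys, PySem.Chars.rstrip (c :: l) = c :: ys := by
  simp only [PySem.Chars.rstrip, List.reverse_cons, List.dropWhile_append]
  split
  · exact ⟨[], by simp [List.dropWhile, hc]⟩
  · exact ⟨(List.dropWhile PySem.Chars.isspace l.reverse).reverse, by simp⟩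

theorem pv_lstrip_space_append (sp : List Char) (c : Char) (l : List Char)
    (hsp : sp.all PySem.Chars.isspace = true) (hc : ¬ PySem.Chars.isspace c = true) :
    PySem.Chars.lstrip (sp ++ c :: l) = c :: l := by
  simp only [List.all_eq_true] at hsp
  have h1 : List.dropWhile PySem.Chars.isspace sp = [] :=
    List.dropWhile_eq_nil_iff.mpr (fun x hx => hsp x hx)
  simp [PySem.Chars.lstrip, List.dropWhile_append, h1, List.dropWhile, hc]

-- resolved step equation for go on a cons cell that is not "\r\n"
theorem pv_go_cons (isB : Char → Bool) (c : Char) (rest cur : List Char) (acc : List (List Char))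
    (hne : ∀ r1, c = '\r' → rest = '\n' :: r1 → False) :
    PySem.Chars.splitlines.go isB (c :: rest) cur acc
      = if isB c then PySem.Chars.splitlines.go isB rest [] (cur.reverse :: acc)
        else PySem.Chars.splitlines.go isB rest (c :: cur) acc := by
  rw [PySem.Chars.splitlines.go.eq_def]
  split
  · rename_i heq; exact absurd heq (by simp)
  · rename_i r1 heq
    exfalso
    simp only [List.cons.injEq] at heq
    exact hne r1 heq.1 heq.2
  · rename_i heq
    injection heq with h1 h2
    subst h1; subst h2; rfl

-- go with an arbitrary accumulator = accumulator prefix ++ go with []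
theorem pv_go_acc (cs cur : List Char) (acc : List (List Char)) :
    PySem.Chars.splitlines.go pvIsB cs cur acc
      = acc.reverse ++ PySem.Chars.splitlines.go pvIsB cs cur [] := by
  refine PySem.Chars.splitlines.go.induct pvIsB
    (motive := fun cs cur _ => ∀ acc, PySem.Chars.splitlines.go pvIsB cs cur acc
       = acc.reverse ++ PySem.Chars.splitlines.go pvIsB cs cur []) ?_ ?_ ?_ ?_ ?_ cs cur [] acc
  · intro cur acc h acc2
    rw [PySem.Chars.splitlines.go.eq_def, PySem.Chars.splitlines.go.eq_def]
    simp [h]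
  · intro cur acc h acc2
    rw [PySem.Chars.splitlines.go.eq_def, PySem.Chars.splitlines.go.eq_def]
    simp [h]
  · intro rest cur acc ih acc2
    rw [PySem.Chars.splitlines.go.eq_def, PySem.Chars.splitlines.go.eq_def]
    simp only
    rw [ih (cur.reverse :: acc2), ih [cur.reverse]]
    simp
  · intro c rest cur acc hne hb ih acc2
    rw [pv_go_cons _ _ _ _ _ hne, pv_go_cons _ _ _ _ _ hne]
    simp only [hb, if_true]
    rw [ih (cur.reverse :: acc2), ih [cur.reverse]]
    simp
  · intro c rest cur acc hne hb ih acc2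
    rw [pv_go_cons _ _ _ _ _ hne, pv_go_cons _ _ _ _ _ hne]
    simp only [hb]
    exact ih acc2

-- N: if the current (reversed) line already has a non-space first char c,
-- the first emitted non-empty stripped line starts with c
theorem pv_go_started (cs cur : List Char) (c : Char) (mid : List Char)
    (h : PySem.Chars.lstrip cur.reverse = c :: mid) (hc : ¬ PySem.Chars.isspace c = true) :
    ∃ tl tls, (PySem.Chars.splitlines.go pvIsB cs cur []).filterMap pvG = (c :: tl) :: tls := by
  refine PySem.Chars.splitlines.go.induct pvIsB
    (motive := fun cs cur _ => ∀ c mid, PySem.Chars.lstrip cur.reverse = c :: mid →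
      ¬ PySem.Chars.isspace c = true →
      ∃ tl tls, (PySem.Chars.splitlines.go pvIsB cs cur []).filterMap pvG = (c :: tl) :: tls)
    ?_ ?_ ?_ ?_ ?_ cs cur [] c mid h hc
  · intro cur acc hemp c mid h hc
    rw [List.isEmpty_iff] at hemp; subst hemp
    simp [PySem.Chars.lstrip] at h
  · intro cur acc hemp c mid h hc
    obtain ⟨ys, hys⟩ := pv_rstrip_cons c mid hc
    rw [PySem.Chars.splitlines.go.eq_def]
    simp only [List.isEmpty_iff]
    split
    · rename_i hc2; exact absurd hc2 (by rw [List.isEmpty_iff] at hemp; exact hemp)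
    · refine ⟨ys, [], ?_⟩
      simp [pvG, PySem.Chars.strip, h, hys]
  · intro rest cur acc ih c mid h hc
    obtain ⟨ys, hys⟩ := pv_rstrip_cons c mid hc
    rw [PySem.Chars.splitlines.go.eq_def]
    simp only
    rw [pv_go_acc]
    refine ⟨ys, (PySem.Chars.splitlines.go pvIsB rest [] []).filterMap pvG, ?_⟩
    simp [pvG, PySem.Chars.strip, h, hys]
  · intro c' rest cur acc hne hb ih c mid h hc
    obtain ⟨ys, hys⟩ := pv_rstrip_cons c mid hc
    rw [pv_go_cons _ _ _ _ _ hne]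
    simp only [hb, if_true]
    rw [pv_go_acc]
    refine ⟨ys, (PySem.Chars.splitlines.go pvIsB rest [] []).filterMap pvG, ?_⟩
    simp [pvG, PySem.Chars.strip, h, hys]
  · intro c' rest cur acc hne hb ih c mid h hc
    rw [pv_go_cons _ _ _ _ _ hne]
    simp only [hb]
    refine ih c (mid ++ [c']) ?_ hc
    have : List.dropWhile PySem.Chars.isspace cur.reverse = c :: mid := h
    simp [PySem.Chars.lstrip, List.dropWhile_append, this]

-- M: with an all-space current line, the filtered stripped lines are [] when
-- lstrip cs is empty, and start with (lstrip cs).head otherwise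
theorem pv_go_main (cs cur : List Char) (hcur : cur.all PySem.Chars.isspace = true) :
    ((PySem.Chars.lstrip cs = [] → (PySem.Chars.splitlines.go pvIsB cs cur []).filterMap pvG = []) ∧
     (∀ c r, PySem.Chars.lstrip cs = c :: r →
       ∃ tl tls, (PySem.Chars.splitlines.go pvIsB cs cur []).filterMap pvG = (c :: tl) :: tls)) := by
  refine PySem.Chars.splitlines.go.induct pvIsB
    (motive := fun cs cur _ => cur.all PySem.Chars.isspace = true →
      ((PySem.Chars.lstrip cs = [] → (PySem.Chars.splitlines.go pvIsB cs cur []).filterMap pvG = []) ∧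
       (∀ c r, PySem.Chars.lstrip cs = c :: r →
         ∃ tl tls, (PySem.Chars.splitlines.go pvIsB cs cur []).filterMap pvG = (c :: tl) :: tls)))
    ?_ ?_ ?_ ?_ ?_ cs cur [] hcur
  · intro cur acc hemp hcur
    rw [List.isEmpty_iff] at hemp; subst hemp
    constructor
    · intro _; rw [PySem.Chars.splitlines.go.eq_def]; simp
    · intro c r h; simp [PySem.Chars.lstrip] at h
  · intro cur acc hemp hcur
    constructor
    · intro _
      rw [PySem.Chars.splitlines.go.eq_def]
      simp only [List.isEmpty_iff]
      split
      · simp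
      · simp [pvG, pv_strip_all_space cur.reverse (by simpa using hcur)]
    · intro c r h; simp [PySem.Chars.lstrip] at h
  · intro rest cur acc ih hcur
    have hstep : PySem.Chars.splitlines.go pvIsB ('\r' :: '\n' :: rest) cur []
        = [cur.reverse] ++ PySem.Chars.splitlines.go pvIsB rest [] [] := by
      rw [PySem.Chars.splitlines.go.eq_def]; simp only; rw [pv_go_acc]; simp
    have hfm : (PySem.Chars.splitlines.go pvIsB ('\r' :: '\n' :: rest) cur []).filterMap pvG
        = (PySem.Chars.splitlines.go pvIsB rest [] []).filterMap pvG := by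
      rw [hstep]
      simp [pvG, pv_strip_all_space cur.reverse (by simpa using hcur)]
    have hls : PySem.Chars.lstrip ('\r' :: '\n' :: rest) = PySem.Chars.lstrip rest := by
      simp [PySem.Chars.lstrip, (by decide : PySem.Chars.isspace '\r' = true),
        (by decide : PySem.Chars.isspace '\n' = true)]
    obtain ⟨ih1, ih2⟩ := ih (by simp)
    refine ⟨fun h => by rw [hfm]; exact ih1 (hls.symm.trans h),
            fun c r h => by rw [hfm]; exact ih2 c r (hls.symm.trans h)⟩
  · intro c rest cur acc hne hb ih hcur
    have hsp := pv_isB_isspace c hb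
    have hstep : PySem.Chars.splitlines.go pvIsB (c :: rest) cur []
        = [cur.reverse] ++ PySem.Chars.splitlines.go pvIsB rest [] [] := by
      rw [pv_go_cons _ _ _ _ _ hne]; simp only [hb, if_true]; rw [pv_go_acc]; simp
    have hfm : (PySem.Chars.splitlines.go pvIsB (c :: rest) cur []).filterMap pvG
        = (PySem.Chars.splitlines.go pvIsB rest [] []).filterMap pvG := by
      rw [hstep]
      simp [pvG, pv_strip_all_space cur.reverse (by simpa using hcur)]
    have hls : PySem.Chars.lstrip (c :: rest) = PySem.Chars.lstrip rest := by
      simp [PySem.Chars.lstrip, hsp]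
    obtain ⟨ih1, ih2⟩ := ih (by simp)
    refine ⟨fun h => by rw [hfm]; exact ih1 (hls.symm.trans h),
            fun c r h => by rw [hfm]; exact ih2 c r (hls.symm.trans h)⟩
  · intro c rest cur acc hne hb ih hcur
    rw [pv_go_cons _ _ _ _ _ hne]
    simp only [hb]
    by_cases hsp : PySem.Chars.isspace c = true
    · have hls : PySem.Chars.lstrip (c :: rest) = PySem.Chars.lstrip rest := by
        simp [PySem.Chars.lstrip, hsp]
      obtain ⟨ih1, ih2⟩ := ih (by simp [hsp, hcur])
      refine ⟨fun h => ih1 (hls.symm.trans h),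
              fun c' r h => ih2 c' r (hls.symm.trans h)⟩
    · have hls : PySem.Chars.lstrip (c :: rest) = c :: rest := by
        simp [PySem.Chars.lstrip, hsp]
      constructor
      · intro h; rw [hls] at h; simp at h
      · intro c' r h
        rw [hls] at h
        injection h with h1 h2
        subst h1
        refine pv_go_started rest (c :: cur) c [] ?_ hsp
        rw [List.reverse_cons]
        show PySem.Chars.lstrip (cur.reverse ++ [c]) = c :: []
        exact pv_lstrip_space_append cur.reverse c [] (by simpa using hcur) hsp

-- the comprehension of port A, named so the scan-is-dead lemma can speak about it
def pvLines (text : String) : List String :=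
  (PySem.Str.splitlines text).filterMap
    (fun ln => if PySem.Str.strip ln ≠ "" then some (PySem.Str.strip ln) else none)

theorem pv_lines_eq (text : String) :
    pvLines text = ((PySem.Chars.splitlines text.toList).filterMap pvG).map String.ofList := by
  rw [pvLines, PySem.Str.splitlines, List.filterMap_map, List.map_filterMap]
  refine List.filterMap_congr (fun l _ => ?_)
  by_cases h : PySem.Chars.strip l = [] <;>
    simp [h, PySem.Str.strip, pvG, String.ofList_eq_empty_iff, Function.comp]

-- A's whole text-scanning tail always evaluates to false
theorem pv_rest_false (text : String) :
    (if PySem.Str.startswith (PySem.Str.lstrip text) "[" || PySem.Str.startswith (PySem.Str.lstrip text) "{" then false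
     else if (pvLines text).isEmpty then false
     else if ((pvLines text).take (min 5 (pvLines text).length)).all
         (fun ln => PySem.Str.startswith ln "{" && PySem.Str.endswith ln "}") then true
     else false) = false := by
  by_cases hbr : (PySem.Str.startswith (PySem.Str.lstrip text) "[" || PySem.Str.startswith (PySem.Str.lstrip text) "{") = true
  · rw [if_pos hbr]
  · rw [if_neg hbr]
    have hbrace : PySem.Str.startswith (PySem.Str.lstrip text) "{" = false := by
      simp only [Bool.or_eq_true, not_or, Bool.not_eq_true] at hbr
      exact hbr.2
    rcases hl : PySem.Chars.lstrip text.toList with _ | ⟨c, r⟩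
    · have h0 := (pv_go_main text.toList [] (by simp)).1 hl
      rw [← pv_splitlines_eq] at h0
      rw [pv_lines_eq, h0]
      simp
    · obtain ⟨tl, tls, h0⟩ := (pv_go_main text.toList [] (by simp)).2 c r hl
      rw [← pv_splitlines_eq] at h0
      have hc : ('{' == c) = false := by
        rw [PySem.Str.startswith_eq, PySem.Str.toList_lstrip, hl] at hbrace
        simpa [PySem.Chars.startswith, List.isPrefixOf] using hbrace
      rw [pv_lines_eq, h0]
      have hmin : min 5 (tls.length + 1) = (min 4 tls.length) + 1 := by omega
      have hhd : PySem.Chars.startswith (String.ofList (c :: tl)).toList ['{'] = false := by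
        rw [String.toList_ofList]
        simp [PySem.Chars.startswith, List.isPrefixOf, hc]
      simp only [List.map_cons]
      simp
      refine ⟨String.ofList (c :: tl), ?_, fun h => absurd h (by
        rw [String.toList_ofList] at hhd
        simp [hhd])⟩
      rw [hmin, List.take_succ_cons]
      exact List.mem_cons_self

-- ===== VERDICT (by name: the statement is the Claim_ definition above) =====
theorem is_probably_jsonl_spec : Claim_equal_is_probably_jsonl := by
  intro text file_name _
  show is_probably_jsonl text file_name = is_probably_jsonl_alt text file_name
  unfold is_probably_jsonl is_probably_jsonl_alt
  cases hC : (match file_name with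
      | some f => !(f == "") && PySem.Str.endswith (PySem.Str.lower f) ".jsonl"
      | none => false)
  · rw [if_neg (by simp)]
    exact pv_rest_false text
  · rw [if_pos rfl]
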